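-- pv_equiv track=rewrite | github.com/manifestingDD/miniSOUL | library/utilities.py | split_months_indices
-- ===== SOURCE A (Python) =====
-- def split_months_indices(months, start_month, end_month):
--     """
--     Splits a list of months into two lists: one containing the months between the start and end month (inclusive),
--     and another containing the rest of the months.
--     """
--     # Find the indices of the start and end months
--     start_index = months.index(start_month)
--     end_index = months.index(end_month)
--
--     # Handle the case where the start month comes after the end month in the list
--     if start_index <= end_index:
--         # Get the indices of the months between the start and end months (inclusive)
--         indices_between = list(range(start_index, end_index + 1))
--         # Get the indices of the rest of the months
--         indices_rest = list(range(start_index)) + list(range(end_index + 1, len(months)))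
--     else:
--         # Get the indices of the months between the start and end months (inclusive), considering the wrap-around
--         indices_between = list(range(start_index, len(months))) + list(range(end_index + 1))
--         # Get the indices of the rest of the months
--         indices_rest = list(range(end_index + 1, start_index))
--
--     # Convert 0-based indices to 1-based indices
--     indices_between = [index + 1 for index in indices_between]
--     indices_rest = [index + 1 for index in indices_rest]
--
--     return indices_between, indices_rest
-- ===== SOURCE B (Python) =====
-- def split_months_indices(months, start_month, end_month):
--     n = len(months)
--     start_index = months.index(start_month)
--     end_index = months.index(end_month)
--     # circular walk from start_index to end_index (inclusive), 1-based
--     indices_between = []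
--     i = start_index
--     while True:
--         indices_between.append(i + 1)
--         if i == end_index:
--             break
--         i = (i + 1) % n
--     between_set = set(indices_between)
--     indices_rest = [j + 1 for j in range(n) if (j + 1) not in between_set]
--     return indices_between, indices_rest
-- ===== Notes on version B (the rewrite author's own statement) =====
-- stated objective: alternative
-- what changed: Replaces A's four-way range concatenation case split by a circular index walk for the between-part and an ascending membership-filtered partition for the rest-part (no wrap/no-wrap branching).
import Mathlib
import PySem

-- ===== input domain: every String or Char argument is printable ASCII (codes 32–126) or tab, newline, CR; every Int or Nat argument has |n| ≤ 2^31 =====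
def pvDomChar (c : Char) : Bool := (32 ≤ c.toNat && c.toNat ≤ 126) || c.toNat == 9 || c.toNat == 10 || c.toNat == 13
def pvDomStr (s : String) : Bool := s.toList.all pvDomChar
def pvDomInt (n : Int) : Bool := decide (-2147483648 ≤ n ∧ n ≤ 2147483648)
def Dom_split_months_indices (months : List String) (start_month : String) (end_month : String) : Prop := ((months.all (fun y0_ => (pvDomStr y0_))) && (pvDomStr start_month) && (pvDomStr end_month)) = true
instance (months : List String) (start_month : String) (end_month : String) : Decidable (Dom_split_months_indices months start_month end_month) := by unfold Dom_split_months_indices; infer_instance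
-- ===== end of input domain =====

-- B replaces A's wrap/no-wrap range-concatenation case split by a circular walk
-- (between) plus an ascending membership-filtered partition (rest): an alternative
-- decomposition, same cost. Equivalence is proved on inputs where both months occur.

-- ===== PORT A =====
def split_months_indices (months : List String) (start_month : String) (end_month : String) : List Int × List Int :=
  match PySem.List.index? months start_month, PySem.List.index? months end_month with
  | some s, some e =>
    let start_index : Int := s
    let end_index : Int := e
    if start_index ≤ end_index then
      let indices_between := PySem.List.pyRange start_index (end_index + 1) 1
      let indices_rest := PySem.List.pyRange 0 start_index 1 ++ PySem.List.pyRange (end_index + 1) (PySem.List.len months) 1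
      (indices_between.map (· + 1), indices_rest.map (· + 1))
    else
      let indices_between := PySem.List.pyRange start_index (PySem.List.len months) 1 ++ PySem.List.pyRange 0 (end_index + 1) 1
      let indices_rest := PySem.List.pyRange (end_index + 1) start_index 1
      (indices_between.map (· + 1), indices_rest.map (· + 1))
  | _, _ => ([], [])  -- Python raises ValueError here; excluded by Pre_

-- ===== PORT B =====
-- the while-True loop of Source B; fuel = n is a totality guard only (under Pre_ the
-- break on i = end_index fires within n steps)
def pvWalk (n ei : Nat) : Nat → Nat → List Int
  | 0, _ => []
  | fuel + 1, i => ((i : Int) + 1) :: (if i = ei then [] else pvWalk n ei fuel ((i + 1) % n))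

def split_months_indices_alt (months : List String) (start_month : String) (end_month : String) : List Int × List Int :=
  let n := months.length
  match PySem.List.index? months start_month with
  | none => ([], [])
  | some si =>
    match PySem.List.index? months end_month with
    | none => ([], [])
    | some ei =>
      let indices_between := pvWalk n ei n si
      let between_set := PySem.Set.ofList indices_between
      let indices_rest := (List.range n).filterMap
        (fun (j : Nat) => if ((j : Int) + 1) ∈ between_set then none else some ((j : Int) + 1))
      (indices_between, indices_rest)

-- ===== PRECONDITION & SPEC =====
-- A raises ValueError (list.index) when start_month or end_month does not occur in months.
def Pre_split_months_indices (months : List String) (start_month : String) (end_month : String) : Prop :=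
  start_month ∈ months ∧ end_month ∈ months
instance (months : List String) (start_month : String) (end_month : String) : Decidable (Pre_split_months_indices months start_month end_month) := by unfold Pre_split_months_indices; infer_instance

def pvWitness_split_months_indices : List String × String × String := (["jan", "feb", "mar", "apr"], "mar", "feb")

def Spec_split_months_indices (months : List String) (start_month : String) (end_month : String) (out : List Int × List Int) : Prop := out = split_months_indices_alt months start_month end_month
instance (months : List String) (start_month : String) (end_month : String) (out : List Int × List Int) : Decidable (Spec_split_months_indices months start_month end_month out) := by unfold Spec_split_months_indices; infer_instance

-- ===== CLAIM (what is proved, stated in full; the proofs are below) =====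
def Claim_equal_split_months_indices : Prop := ∀ (months : List String) (start_month : String) (end_month : String), Dom_split_months_indices months start_month end_month → Pre_split_months_indices months start_month end_month → Spec_split_months_indices months start_month end_month (split_months_indices months start_month end_month)

-- ===== LEMMAS AND PROOFS =====

-- The walk from i ≤ ei (< n) is the plain range [i, ei] shifted by one.
theorem pvWalk_le (n ei : Nat) (hei : ei < n) :
    ∀ (fuel i : Nat), i ≤ ei → ei - i < fuel →
      pvWalk n ei fuel i = (PySem.List.pyRange (i : Int) ((ei : Int) + 1) 1).map (· + 1) := by
  intro fuel
  induction fuel with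
  | zero => intro i _ h; omega
  | succ f ih =>
    intro i hle hf
    by_cases h : i = ei
    · subst h
      simp [pvWalk, PySem.List.pyRange_one_singleton]
    · have hlt : i < ei := lt_of_le_of_ne hle h
      rw [pvWalk, if_neg h, Nat.mod_eq_of_lt (by omega), ih (i + 1) (by omega) (by omega),
        PySem.List.pyRange_one_cons (show (i : Int) < (ei : Int) + 1 by omega),
        List.map_cons]
      push_cast
      ring_nf

-- The walk from i > ei wraps: range [i, n) then [0, ei], shifted by one.
theorem pvWalk_gt (n ei : Nat) (hei : ei < n) :
    ∀ (fuel i : Nat), ei < i → i < n → (n - i) + ei < fuel →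
      pvWalk n ei fuel i =
        (PySem.List.pyRange (i : Int) (n : Int) 1 ++ PySem.List.pyRange 0 ((ei : Int) + 1) 1).map (· + 1) := by
  intro fuel
  induction fuel with
  | zero => intro i _ _ h; omega
  | succ f ih =>
    intro i hgt hin hf
    have hne : i ≠ ei := by omega
    rw [pvWalk, if_neg hne]
    by_cases hend : i + 1 = n
    · have hmod : (i + 1) % n = 0 := by rw [hend]; exact Nat.mod_self n
      rw [hmod, pvWalk_le n ei hei f 0 (by omega) (by omega)]
      have hr : PySem.List.pyRange (i : Int) (n : Int) 1 = [(i : Int)] := by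
        have hni : (n : Int) = (i : Int) + 1 := by exact_mod_cast hend.symm
        rw [hni, PySem.List.pyRange_one_singleton]
      simp [hr]
    · rw [Nat.mod_eq_of_lt (by omega), ih (i + 1) (by omega) (by omega) (by omega),
        PySem.List.pyRange_one_cons (show (i : Int) < (n : Int) by omega),
        List.cons_append, List.map_cons]
      push_cast
      ring_nf

-- filterMap of an if-filter: all elements rejected → map (· + 1); all accepted → [].
theorem filterMap_if_none (l : List Int) (c : Int → Prop) [DecidablePred c]
    (h : ∀ x ∈ l, ¬ c x) :
    l.filterMap (fun j => if c j then none else some (j + 1)) = l.map (· + 1) := by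
  induction l with
  | nil => rfl
  | cons a t ih =>
    rw [List.filterMap_cons, if_neg (h a (by simp)), List.map_cons,
      ih (fun x hx => h x (by simp [hx]))]

theorem filterMap_if_all (l : List Int) (c : Int → Prop) [DecidablePred c]
    (h : ∀ x ∈ l, c x) :
    l.filterMap (fun j => if c j then none else some (j + 1)) = [] := by
  induction l with
  | nil => rfl
  | cons a t ih =>
    rw [List.filterMap_cons, if_pos (h a (by simp)), ih (fun x hx => h x (by simp [hx]))]

theorem mem_map_add_one_pyRange (a b x : Int) :
    x ∈ (PySem.List.pyRange a b 1).map (· + 1) ↔ a + 1 ≤ x ∧ x < b + 1 := by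
  simp only [List.mem_map, PySem.List.mem_pyRange_one]
  constructor
  · rintro ⟨y, ⟨h1, h2⟩, rfl⟩; omega
  · rintro ⟨h1, h2⟩; exact ⟨x - 1, ⟨by omega, by omega⟩, by omega⟩

-- List.range n as an Int comprehension equals the same filter over pyRange 0 n.
theorem range_filterMap_eq (n : Nat) (c : Int → Prop) [DecidablePred c] :
    (List.range n).filterMap (fun (j : Nat) => if c ((j : Int) + 1) then none else some ((j : Int) + 1))
      = (PySem.List.pyRange 0 (n : Int) 1).filterMap (fun j => if c (j + 1) then none else some (j + 1)) := by
  rw [PySem.List.pyRange_one, List.filterMap_map]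
  simp

-- ===== VERDICT (by name: the statement is the Claim_ definition above) =====
theorem split_months_indices_spec : Claim_equal_split_months_indices := by
  intro months start_month end_month _ hpre
  unfold Spec_split_months_indices split_months_indices split_months_indices_alt
  obtain ⟨hs, he⟩ := hpre
  obtain ⟨s, hsi⟩ := Option.isSome_iff_exists.mp ((PySem.List.index?_isSome_iff months start_month).mpr hs)
  obtain ⟨e, hei⟩ := Option.isSome_iff_exists.mp ((PySem.List.index?_isSome_iff months end_month).mpr he)
  obtain ⟨hslt, -, -⟩ := PySem.List.getElem_of_index?_eq_some hsi
  obtain ⟨helt, -, -⟩ := PySem.List.getElem_of_index?_eq_some hei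
  rw [hsi, hei]
  simp only [PySem.List.len_eq]
  set n := months.length with hn
  by_cases hle : (s : Int) ≤ (e : Int)
  · -- no wrap: between = [s, e]
    have hsen : s ≤ e := by exact_mod_cast hle
    have hwalk := pvWalk_le n e helt n s hsen (by omega)
    rw [if_pos hle, Prod.mk.injEq]
    refine ⟨hwalk.symm, ?_⟩
    rw [hwalk, range_filterMap_eq n,
      PySem.List.pyRange_one_append 0 (s : Int) (n : Int) (by omega) (by omega),
      PySem.List.pyRange_one_append (s : Int) ((e : Int) + 1) (n : Int)
        (by omega) (by omega),
      List.filterMap_append, List.filterMap_append,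
      filterMap_if_none _ _ (by
        intro x hx
        rw [PySem.List.mem_pyRange_one] at hx
        rw [PySem.Set.mem_ofList, mem_map_add_one_pyRange]
        omega),
      filterMap_if_all _ _ (by
        intro x hx
        rw [PySem.List.mem_pyRange_one] at hx
        rw [PySem.Set.mem_ofList, mem_map_add_one_pyRange]
        omega),
      filterMap_if_none _ _ (by
        intro x hx
        rw [PySem.List.mem_pyRange_one] at hx
        rw [PySem.Set.mem_ofList, mem_map_add_one_pyRange]
        omega)]
    simp
  · -- wrap: between = [s, n) ∪ [0, e]
    have hgt : e < s := by omega
    have hwalk := pvWalk_gt n e helt n s hgt hslt (by omega)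
    rw [if_neg hle, Prod.mk.injEq]
    refine ⟨hwalk.symm, ?_⟩
    have hmem : ∀ x : Int,
        x ∈ PySem.Set.ofList
            ((PySem.List.pyRange (s : Int) (n : Int) 1 ++ PySem.List.pyRange 0 ((e : Int) + 1) 1).map (· + 1))
          ↔ ((s : Int) + 1 ≤ x ∧ x < (n : Int) + 1) ∨ (1 ≤ x ∧ x < (e : Int) + 2) := by
      intro x
      rw [PySem.Set.mem_ofList, List.map_append, List.mem_append,
        mem_map_add_one_pyRange, mem_map_add_one_pyRange]
      omega
    rw [hwalk, range_filterMap_eq n,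
      PySem.List.pyRange_one_append 0 ((e : Int) + 1) (n : Int)
        (by omega) (by omega),
      PySem.List.pyRange_one_append ((e : Int) + 1) (s : Int) (n : Int)
        (by omega) (by omega),
      List.filterMap_append, List.filterMap_append,
      filterMap_if_all _ _ (by
        intro x hx
        rw [PySem.List.mem_pyRange_one] at hx
        rw [hmem]
        omega),
      filterMap_if_none _ _ (by
        intro x hx
        rw [PySem.List.mem_pyRange_one] at hx
        rw [hmem]
        omega),
      filterMap_if_all _ _ (by
        intro x hx
        rw [PySem.List.mem_pyRange_one] at hx
        rw [hmem]
        omega)]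
    simp
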